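-- pv_equiv track=rewrite | github.com/josh-keller/advent-of-code | 2015/day05/solution.py | three_vowels
-- ===== SOURCE A (Python) =====
-- def three_vowels(s):
--     vowels = ['a', 'e', 'i', 'o', 'u']
--     vowel_count = 0
--
--     for l in s:
--         if l in vowels:
--             vowel_count += 1
--         if vowel_count >= 3:
--             return True
--
--     return False
-- ===== SOURCE B (Python) =====
-- def three_vowels(s):
--     return sum(s.count(v) for v in "aeiou") >= 3
-- ===== Notes on version B (the rewrite author's own statement) =====
-- stated objective: simpler
-- what changed: Replaces the single early-exit scan with a running counter by five independent str.count passes (one per vowel) whose sum is compared to 3.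
import Mathlib
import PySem

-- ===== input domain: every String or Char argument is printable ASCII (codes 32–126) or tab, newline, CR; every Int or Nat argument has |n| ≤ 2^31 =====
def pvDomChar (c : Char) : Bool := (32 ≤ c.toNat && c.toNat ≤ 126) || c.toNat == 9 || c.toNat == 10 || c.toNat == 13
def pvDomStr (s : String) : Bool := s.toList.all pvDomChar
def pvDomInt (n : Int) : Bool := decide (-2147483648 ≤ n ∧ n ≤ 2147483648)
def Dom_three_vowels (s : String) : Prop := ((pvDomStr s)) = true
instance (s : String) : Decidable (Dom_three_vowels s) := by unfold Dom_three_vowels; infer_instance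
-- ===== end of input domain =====

-- B replaces A's single early-exit scan with a running counter by five per-vowel
-- str.count passes summed and compared to 3 (objective: simpler).


-- ===== PORT A =====
-- the for-loop over s with the running vowel_count and the early 'return True'
def threeVowelsLoopA : List Char → Nat → Bool
  | [], _ => false
  | l :: rest, c =>
    let c' := if l ∈ (['a', 'e', 'i', 'o', 'u'] : List Char) then c + 1 else c
    if 3 ≤ c' then true else threeVowelsLoopA rest c'

def three_vowels (s : String) : Bool := threeVowelsLoopA s.toList 0

-- ===== PORT B =====
-- sum(s.count(v) for v in "aeiou") >= 3
def three_vowels_alt (s : String) : Bool :=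
  decide (3 ≤ ("aeiou".toList.map (fun v => PySem.Str.count s (String.ofList [v]))).sum)

-- ===== PRECONDITION & SPEC =====
def Spec_three_vowels (s : String) (out : Bool) : Prop := out = three_vowels_alt s
instance (s : String) (out : Bool) : Decidable (Spec_three_vowels s out) := by unfold Spec_three_vowels; infer_instance

-- ===== CLAIM (what is proved, stated in full; the proofs are below) =====
def Claim_equal_three_vowels : Prop := ∀ (s : String), Dom_three_vowels s → Spec_three_vowels s (three_vowels s)

-- ===== LEMMAS AND PROOFS =====

-- Python s.count(v) for a single character v is the character count
theorem count_go_single (v : Char) : ∀ (cs : List Char) (acc : Nat),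
    PySem.Chars.count.go [v] cs.length cs acc = acc + cs.count v := by
  intro cs
  induction cs with
  | nil => intro acc; simp [PySem.Chars.count.go]
  | cons l t ih =>
    intro acc
    rw [List.length_cons, PySem.Chars.count.go]
    by_cases h : l = v
    · subst h
      simp [List.isPrefixOf, ih]
      omega
    · have : ([v].isPrefixOf (l :: t)) = false := by
        simp [List.isPrefixOf]; exact fun hvl => (h hvl.symm).elim
      simp [this, ih, h]

theorem count_single (cs : List Char) (v : Char) :
    PySem.Chars.count cs [v] = cs.count v := by
  rw [PySem.Chars.count]
  simp [count_go_single]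

-- the five per-vowel counts sum to the number of vowel characters
theorem sum_counts (cs : List Char) :
    (['a', 'e', 'i', 'o', 'u'].map (fun v => cs.count v)).sum
      = cs.countP (fun l => decide (l ∈ (['a', 'e', 'i', 'o', 'u'] : List Char))) := by
  induction cs with
  | nil => simp
  | cons l t ih =>
    simp only [List.map, List.sum_cons, List.count_cons, List.countP_cons]
    by_cases ha : l = 'a' <;> by_cases he : l = 'e' <;> by_cases hi : l = 'i' <;>
      by_cases ho : l = 'o' <;> by_cases hu : l = 'u' <;>
      simp_all <;> omega

-- A's early-exit loop computes 'at least 3 vowels seen in total'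
theorem loopA_eq (cs : List Char) : ∀ (c : Nat), c < 3 →
    threeVowelsLoopA cs c
      = decide (3 ≤ c + cs.countP (fun l => decide (l ∈ (['a', 'e', 'i', 'o', 'u'] : List Char)))) := by
  induction cs with
  | nil => intro c hc; simp [threeVowelsLoopA]; omega
  | cons l t ih =>
    intro c hc
    rw [threeVowelsLoopA, List.countP_cons]
    by_cases h : l ∈ (['a', 'e', 'i', 'o', 'u'] : List Char)
    · have hd : decide (l ∈ (['a', 'e', 'i', 'o', 'u'] : List Char)) = true := decide_eq_true h
      simp only [if_pos h, hd, if_true]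
      by_cases h3 : 3 ≤ c + 1
      · rw [if_pos h3]; symm; rw [decide_eq_true_iff]; omega
      · rw [if_neg h3, ih _ (by omega)]; simp only [decide_eq_decide]; omega
    · have hd : decide (l ∈ (['a', 'e', 'i', 'o', 'u'] : List Char)) = false := decide_eq_false h
      simp only [if_neg h, hd, Bool.false_eq_true, if_false]
      have h3 : ¬ 3 ≤ c := by omega
      rw [if_neg h3, ih _ hc]; simp only [decide_eq_decide]; omega

-- ===== VERDICT (by name: the statement is the Claim_ definition above) =====
theorem three_vowels_spec : Claim_equal_three_vowels := by
  intro s _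
  unfold Spec_three_vowels three_vowels three_vowels_alt
  rw [loopA_eq _ _ (by omega)]
  have hs : ∀ v : Char, PySem.Str.count s (String.ofList [v]) = s.toList.count v := by
    intro v
    rw [PySem.Str.count_eq]
    have hm : (String.ofList [v]).toList = [v] := String.toList_ofList
    rw [hm, count_single]
  have ha : ("aeiou".toList) = ['a', 'e', 'i', 'o', 'u'] := by decide
  simp only [hs, ha, sum_counts]
  simp
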